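-- pv_equiv track=rewrite | github.com/AngeCT/Jeu_echec | Jeu/jeu1.1 (copie).py | tab_anti_saut
-- ===== SOURCE A (Python) =====
-- def tab_anti_saut(tab):
--     indice_piece = None
--     indice_obstacle_av = None
--     indice_obstacle_ap = None
--     for k in range(len(tab)): #Trouve l'indice de la piece
--         if tab[k] == 2:
--             indice_piece = k
--     for i in range(indice_piece,-1,-1): #Trouve l'indice 1 le plus proche de 2 avant 2
--         if tab[i] == 1 or tab[i] == 4:
--             indice_obstacle_av = i
--             break
--     if indice_obstacle_av != None: # si l'indice existe il supprime la suite
--         for a in range(len(tab)):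
--             if a < indice_obstacle_av:
--                 tab[a] = 3
--     for t in range(indice_piece,len(tab)): #Trouve l'indice 1 le plus proche de 2 apres 2
--         if tab[t] == 1 or tab[t] == 4:
--             indice_obstacle_ap = t
--             break
--     if indice_obstacle_ap != None: # si l'indice existe il supprime la suite
--         for t in range(indice_piece,len(tab)):
--             if t > indice_obstacle_ap:
--                 tab[t] = 3
--     return(tab)
-- ===== SOURCE B (Python) =====
-- def tab_anti_saut(tab):
--     indice_piece = None
--     for k, v in enumerate(tab):  # last index holding the piece (2)
--         if v == 2:
--             indice_piece = k
--     # one backward pass: mark 3 only after crossing the nearest obstacle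
--     passe = False
--     for i in range(indice_piece, -1, -1):
--         if passe:
--             tab[i] = 3
--         elif tab[i] == 1 or tab[i] == 4:
--             passe = True
--     # one forward pass, symmetric
--     passe = False
--     for t in range(indice_piece, len(tab)):
--         if passe:
--             tab[t] = 3
--         elif tab[t] == 1 or tab[t] == 4:
--             passe = True
--     return tab
-- ===== Notes on version B (the rewrite author's own statement) =====
-- stated objective: simpler
-- what changed: A finds the nearest obstacle with a break loop and then re-walks a whole index range overwriting cells on each side; B does one fused scan per direction that flips a flag at the first obstacle and marks every later cell 3, so the separate find and overwrite passes disappear.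
import Mathlib
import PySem

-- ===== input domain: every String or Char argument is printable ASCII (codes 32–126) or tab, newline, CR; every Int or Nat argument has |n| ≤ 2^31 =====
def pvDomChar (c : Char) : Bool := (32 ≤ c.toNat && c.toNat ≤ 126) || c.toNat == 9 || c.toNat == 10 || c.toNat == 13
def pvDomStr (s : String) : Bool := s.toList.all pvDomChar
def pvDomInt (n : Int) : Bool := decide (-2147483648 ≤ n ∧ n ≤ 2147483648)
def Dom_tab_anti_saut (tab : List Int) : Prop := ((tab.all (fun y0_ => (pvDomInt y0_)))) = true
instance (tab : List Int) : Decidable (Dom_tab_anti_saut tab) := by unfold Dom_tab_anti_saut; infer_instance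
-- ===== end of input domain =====

-- B fuses each of A's find-the-obstacle loop + overwrite loop into a single scan per
-- direction (objective: simpler, one pass per direction). Both Pythons mutate the list
-- in place; the equivalence proved here is about the returned value.

-- ===== PORT A =====
def tab_anti_saut (tab : List Int) : List Int :=
  -- for k in range(len(tab)): if tab[k] == 2: indice_piece = k
  let ip? : Option Int := (PySem.List.pyRange 0 (tab.length : Int) 1).foldl
      (fun acc k => if PySem.List.pyGetD tab k 0 == 2 then some k else acc) none
  match ip? with
  | none => []   -- Python raises TypeError here (range(None, -1, -1)); excluded by Pre_
  | some ip =>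
      -- for i in range(indice_piece, -1, -1): … break   (break modelled by the acc.isSome guard)
      let av? : Option Int := (PySem.List.pyRange ip (-1) (-1)).foldl
          (fun acc i => if acc.isSome then acc
            else if PySem.List.pyGetD tab i 0 == 1 || PySem.List.pyGetD tab i 0 == 4 then some i
            else acc) none
      let tab1 : List Int :=
        match av? with
        | none => tab
        | some av => (PySem.List.pyRange 0 (tab.length : Int) 1).foldl
            (fun u a => if a < av then PySem.List.pySetD u a 3 else u) tab
      let ap? : Option Int := (PySem.List.pyRange ip (tab1.length : Int) 1).foldl
          (fun acc t => if acc.isSome then acc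
            else if PySem.List.pyGetD tab1 t 0 == 1 || PySem.List.pyGetD tab1 t 0 == 4 then some t
            else acc) none
      match ap? with
      | none => tab1
      | some ap => (PySem.List.pyRange ip (tab1.length : Int) 1).foldl
          (fun u t => if ap < t then PySem.List.pySetD u t 3 else u) tab1

-- ===== PORT B =====
-- one scan step: once past an obstacle mark 3, otherwise just watch for an obstacle
-- ===== PORT B =====
-- one scan step: once past an obstacle mark 3, otherwise just watch for an obstacle
def pvScanStep (s : List Int × Bool) (i : Int) : List Int × Bool :=
  if s.2 then (PySem.List.pySetD s.1 i 3, s.2)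
  else if PySem.List.pyGetD s.1 i 0 == 1 || PySem.List.pyGetD s.1 i 0 == 4 then (s.1, true)
  else s

def tab_anti_saut_alt (tab : List Int) : List Int :=
  -- for k, v in enumerate(tab): if v == 2: indice_piece = k
  let ip? : Option Int := (PySem.List.enumerate tab 0).foldl
      (fun acc kv => if kv.2 == 2 then some kv.1 else acc) none
  match ip? with
  | none => []   -- Python raises TypeError here as well; excluded by Pre_
  | some ip =>
      let s1 := (PySem.List.pyRange ip (-1) (-1)).foldl pvScanStep (tab, false)
      let tab1 := s1.1
      let s2 := (PySem.List.pyRange ip (tab1.length : Int) 1).foldl pvScanStep (tab1, false)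
      s2.1

-- ===== PRECONDITION & SPEC =====
-- Pre_ excludes exactly the inputs containing no cell equal to 2, on which the Python A
-- (and B alike) raises TypeError from range(None, -1, -1).
def Pre_tab_anti_saut (tab : List Int) : Prop := (2 : Int) ∈ tab
instance (tab : List Int) : Decidable (Pre_tab_anti_saut tab) := by unfold Pre_tab_anti_saut; infer_instance

def pvWitness_tab_anti_saut : List Int := [0, 1, 0, 2, 0, 4, 0]

def Spec_tab_anti_saut (tab : List Int) (out : List Int) : Prop := out = tab_anti_saut_alt tab
instance (tab : List Int) (out : List Int) : Decidable (Spec_tab_anti_saut tab out) := by unfold Spec_tab_anti_saut; infer_instance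

-- ===== CLAIM =====
def Claim_equal_tab_anti_saut : Prop := ∀ (tab : List Int), Dom_tab_anti_saut tab → Pre_tab_anti_saut tab → Spec_tab_anti_saut tab (tab_anti_saut tab)

-- ===== LEMMAS AND PROOFS =====

def pvObst (t : List Int) (i : Int) : Bool :=
  PySem.List.pyGetD t i 0 == 1 || PySem.List.pyGetD t i 0 == 4

def pvAfter (pred : Int → Bool) : List Int → List Int
  | [] => []
  | x :: xs => if pred x then xs else pvAfter pred xs


theorem pv_foldSome (pred : Int → Bool) (L : List Int) (v : Int) :
    L.foldl (fun acc i => if acc.isSome then acc else if pred i then some i else acc) (some v) = some v := by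
  induction L with
  | nil => rfl
  | cons x xs ih => simpa using ih

theorem pv_firstFold (pred : Int → Bool) (L : List Int) :
    L.foldl (fun acc i => if acc.isSome then acc else if pred i then some i else acc) none
      = L.find? pred := by
  induction L with
  | nil => rfl
  | cons x xs ih =>
    simp only [List.foldl_cons, List.find?]
    cases hx : pred x with
    | true => simpa [hx] using pv_foldSome pred xs x
    | false => simpa [hx] using ih

theorem pv_firstFoldObst (t : List Int) (L : List Int) :
    L.foldl (fun acc i => if acc.isSome then acc
      else if PySem.List.pyGetD t i 0 == 1 || PySem.List.pyGetD t i 0 == 4 then some i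
      else acc) none = L.find? (pvObst t) := pv_firstFold (pvObst t) L

theorem pv_lastFold_mem (pred : Int → Bool) (L : List Int) : ∀ (acc : Option Int) (v : Int),
    L.foldl (fun acc k => if pred k then some k else acc) acc = some v →
    acc = some v ∨ v ∈ L := by
  induction L with
  | nil => intro acc v h; exact Or.inl h
  | cons x xs ih =>
    intro acc v h
    rcases ih _ v h with h' | h'
    · by_cases hx : pred x = true
      · simp [hx] at h'; simp [h']
      · simp [hx] at h'; exact Or.inl h'
    · simp [h']

theorem pv_scanTrue (L : List Int) : ∀ (t : List Int),
    L.foldl pvScanStep (t, true)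
      = (L.foldl (fun u i => PySem.List.pySetD u i 3) t, true) := by
  induction L with
  | nil => intro t; rfl
  | cons x xs ih => intro t; simpa [pvScanStep] using ih _

theorem pv_bscan (L : List Int) : ∀ (t : List Int),
    L.foldl pvScanStep (t, false)
      = (match L.find? (pvObst t) with
        | none => (t, false)
        | some _ => ((pvAfter (pvObst t) L).foldl (fun u i => PySem.List.pySetD u i 3) t, true)) := by
  induction L with
  | nil => intro t; rfl
  | cons x xs ih =>
    intro t
    simp only [List.foldl_cons, List.find?]
    cases hx : pvObst t x with
    | true =>
      have hstep : pvScanStep (t, false) x = (t, true) := by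
        simp [pvScanStep, pvObst] at hx ⊢
        rcases hx with h | h <;> simp [h]
      rw [hstep, pv_scanTrue]
      simp [pvAfter, hx]
    | false =>
      have hstep : pvScanStep (t, false) x = (t, false) := by
        simp [pvScanStep, pvObst] at hx ⊢
        simp [hx]
      rw [hstep, ih]
      simp [pvAfter, hx]

def pvDown : Nat → List Int
  | 0 => [0]
  | p + 1 => ((p + 1 : Nat) : Int) :: pvDown p

theorem pv_setFold_len (M : List Int) : ∀ (t : List Int),
    (M.foldl (fun u i => PySem.List.pySetD u i 3) t).length = t.length := by
  induction M with
  | nil => intro t; rfl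
  | cons a M ih => intro t; rw [List.foldl_cons, ih, PySem.List.length_pySetD]

theorem pv_setFold_get (M : List Int) : ∀ (t : List Int), (∀ a ∈ M, 0 ≤ a) →
    ∀ (j : Nat) (hj : j < t.length),
    (M.foldl (fun u i => PySem.List.pySetD u i 3) t)[j]?
      = some (if (j : Int) ∈ M then 3 else t[j]) := by
  induction M with
  | nil => intro t _ j hj; simp [hj]
  | cons a M ih =>
    intro t hM j hj
    have ha : 0 ≤ a := hM a (List.mem_cons_self ..)
    rw [List.foldl_cons, PySem.List.pySetD_of_nonneg _ _ ha]
    have hj' : j < (t.set a.toNat 3).length := by simpa using hj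
    rw [ih _ (fun x hx => hM x (List.mem_cons_of_mem _ hx)) j hj']
    by_cases hm : (j : Int) ∈ M
    · simp [hm]
    · by_cases hja : (j : Int) = a
      · have h2 : a.toNat = j := by omega
        simp [hja, h2]
      · have h2 : a.toNat ≠ j := by omega
        simp [hm, hja, h2]

theorem pv_pyRange_down (p : Nat) :
    PySem.List.pyRange (p : Int) (-1) (-1) = pvDown p := by
  induction p with
  | zero => rfl
  | succ q ih =>
    rw [PySem.List.pyRange_neg_one_cons (by push_cast; omega)]
    have h1 : ((q + 1 : Nat) : Int) - 1 = (q : Int) := by push_cast; omega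
    rw [h1, ih]
    simp [pvDown]

theorem pv_mem_pvDown (p : Nat) (x : Int) : x ∈ pvDown p ↔ 0 ≤ x ∧ x ≤ p := by
  induction p with
  | zero => simp [pvDown]; omega
  | succ q ih => simp [pvDown, ih]; omega

theorem pv_after_down (pred : Int → Bool) (q : Nat) : ∀ (av : Int),
    (pvDown q).find? pred = some av →
    ∀ x, (x ∈ pvAfter pred (pvDown q) ↔ 0 ≤ x ∧ x < av) := by
  induction q with
  | zero =>
    intro av h x
    cases h0 : pred 0 with
    | true =>
      rw [show pvDown 0 = [0] from rfl, List.find?_cons_of_pos h0] at h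
      rw [show pvDown 0 = [0] from rfl]
      simp only [Option.some.injEq] at h
      simp [pvAfter, h0, ← h]
    | false =>
      rw [show pvDown 0 = [0] from rfl, List.find?_cons_of_neg (by simp [h0])] at h
      simp at h
  | succ q ih =>
    intro av h x
    rw [show pvDown (q+1) = ((q+1:Nat):Int) :: pvDown q from rfl] at h ⊢
    cases hq : pred ((q + 1 : Nat) : Int) with
    | true =>
      rw [List.find?_cons_of_pos hq] at h
      simp only [Option.some.injEq] at h
      have e1 : pvAfter pred (((q+1:Nat):Int) :: pvDown q) = pvDown q := by
        simp only [pvAfter, hq]; simp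
      rw [e1]
      rw [pv_mem_pvDown]
      push_cast at h ⊢
      omega
    | false =>
      rw [List.find?_cons_of_neg (by rw [hq]; simp)] at h
      have e1 : pvAfter pred (((q+1:Nat):Int) :: pvDown q) = pvAfter pred (pvDown q) := by
        simp only [pvAfter, hq]; simp
      rw [e1]
      exact ih av h x

theorem pv_after_range (pred : Int → Bool) (k : Nat) : ∀ (a b ap : Int), (b - a).toNat = k →
    (PySem.List.pyRange a b 1).find? pred = some ap →
    (∀ x, x ∈ pvAfter pred (PySem.List.pyRange a b 1) ↔ ap < x ∧ x < b) := by
  induction k with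
  | zero =>
    intro a b ap hk h
    rw [PySem.List.pyRange_one_eq_nil (by omega)] at h
    simp at h
  | succ k ih =>
    intro a b ap hk h x
    have hab : a < b := by omega
    rw [PySem.List.pyRange_one_cons hab] at h ⊢
    cases hp : pred a with
    | true =>
      rw [List.find?_cons_of_pos hp] at h
      simp only [Option.some.injEq] at h
      rw [show pvAfter pred (a :: PySem.List.pyRange (a+1) b 1) = PySem.List.pyRange (a+1) b 1 by simp [pvAfter, hp]]
      rw [PySem.List.mem_pyRange_one, ← h]
      omega
    | false =>
      rw [List.find?_cons_of_neg (by simp [hp])] at h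
      rw [show pvAfter pred (a :: PySem.List.pyRange (a+1) b 1) = pvAfter pred (PySem.List.pyRange (a+1) b 1) by simp [pvAfter, hp]]
      exact ih (a+1) b ap (by omega) h x


theorem pv_forward (t1 : List Int) (ip : Int) (hip : 0 ≤ ip) :
    (match (PySem.List.pyRange ip (t1.length : Int) 1).find? (pvObst t1) with
     | none => t1
     | some ap => (PySem.List.pyRange ip (t1.length : Int) 1).foldl
         (fun u t => if ap < t then PySem.List.pySetD u t 3 else u) t1)
    = ((PySem.List.pyRange ip (t1.length : Int) 1).foldl pvScanStep (t1, false)).1 := by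
  rw [pv_bscan]
  cases hAp : (PySem.List.pyRange ip (t1.length : Int) 1).find? (pvObst t1) with
  | none => rfl
  | some ap =>
    have hmem := List.mem_of_find?_eq_some hAp
    rw [PySem.List.mem_pyRange_one] at hmem
    have hchar := pv_after_range (pvObst t1) (((t1.length : Int) - ip).toNat) ip _ ap rfl hAp
    dsimp only
    rw [PySem.List.foldl_ite_eq_foldl_filter (p := fun t => ap < t) (f := fun u t => PySem.List.pySetD u t 3)]
    apply List.ext_getElem?
    intro j
    by_cases hj : j < t1.length
    · rw [pv_setFold_get _ _ ?hA j hj, pv_setFold_get _ _ ?hB j hj]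
      case hA =>
        intro x hx; rw [List.mem_filter, PySem.List.mem_pyRange_one] at hx
        omega
      case hB =>
        intro x hx; rw [hchar x] at hx; omega
      have hiff : ((j : Int) ∈ (PySem.List.pyRange ip (t1.length : Int) 1).filter (fun t => decide (ap < t)))
          ↔ ((j : Int) ∈ pvAfter (pvObst t1) (PySem.List.pyRange ip (t1.length : Int) 1)) := by
        rw [List.mem_filter, PySem.List.mem_pyRange_one, hchar]
        simp only [decide_eq_true_eq]
        omega
      rw [if_congr hiff rfl rfl]
    · rw [List.getElem?_eq_none, List.getElem?_eq_none] <;> rw [pv_setFold_len] <;> omega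


theorem pv_stage2 (t1 : List Int) (ip : Int) (hip : 0 ≤ ip) :
    (match (PySem.List.pyRange ip (t1.length : Int) 1).foldl
        (fun acc t => if acc.isSome then acc
          else if PySem.List.pyGetD t1 t 0 == 1 || PySem.List.pyGetD t1 t 0 == 4 then some t
          else acc) none with
     | none => t1
     | some ap => (PySem.List.pyRange ip (t1.length : Int) 1).foldl
         (fun u t => if ap < t then PySem.List.pySetD u t 3 else u) t1)
    = ((PySem.List.pyRange ip (t1.length : Int) 1).foldl pvScanStep (t1, false)).1 := by
  rw [pv_firstFoldObst]
  exact pv_forward t1 ip hip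


theorem pv_main (tab : List Int) : tab_anti_saut tab = tab_anti_saut_alt tab := by
  unfold tab_anti_saut tab_anti_saut_alt
  have hen : (PySem.List.enumerate tab 0).foldl (fun acc kv => if kv.2 == 2 then some kv.1 else acc) none
      = (PySem.List.pyRange 0 (tab.length : Int) 1).foldl
          (fun acc k => if PySem.List.pyGetD tab k 0 == 2 then some k else acc) none := by
    simp [PySem.List.enumerate_eq_map_pyRange tab 0, List.foldl_map, PySem.List.len]
  rw [hen]
  cases hip : (PySem.List.pyRange 0 (tab.length : Int) 1).foldl
      (fun acc k => if PySem.List.pyGetD tab k 0 == 2 then some k else acc) none with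
  | none => rfl
  | some ip =>
    dsimp only
    have hmem : ip ∈ PySem.List.pyRange 0 (tab.length : Int) 1 := by
      rcases pv_lastFold_mem _ _ _ _ hip with h | h
      · exact absurd h (by simp)
      · exact h
    rw [PySem.List.mem_pyRange_one] at hmem
    have hip0 : (ip.toNat : Int) = ip := Int.toNat_of_nonneg hmem.1
    have hdown : PySem.List.pyRange ip (-1) (-1) = pvDown ip.toNat := by
      rw [← hip0]; exact pv_pyRange_down ip.toNat
    rw [hdown]
    rw [pv_firstFoldObst tab, pv_bscan (pvDown ip.toNat) tab]
    cases hAv : (pvDown ip.toNat).find? (pvObst tab) with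
    | none =>
      exact pv_stage2 tab ip hmem.1
    | some av =>
      have hchar := pv_after_down (pvObst tab) ip.toNat av hAv
      have hEq1 : (PySem.List.pyRange 0 (tab.length : Int) 1).foldl
            (fun u a => if a < av then PySem.List.pySetD u a 3 else u) tab
          = (pvAfter (pvObst tab) (pvDown ip.toNat)).foldl
            (fun u i => PySem.List.pySetD u i 3) tab := by
        rw [PySem.List.foldl_ite_eq_foldl_filter (p := fun a => a < av) (f := fun u a => PySem.List.pySetD u a 3)]
        apply List.ext_getElem?
        intro j
        by_cases hj : j < tab.length
        · rw [pv_setFold_get _ _ ?hA j hj, pv_setFold_get _ _ ?hB j hj]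
          case hA =>
            intro x hx; rw [List.mem_filter, PySem.List.mem_pyRange_one] at hx
            omega
          case hB =>
            intro x hx; rw [hchar x] at hx; omega
          have hiff : ((j : Int) ∈ (PySem.List.pyRange 0 (tab.length : Int) 1).filter (fun a => decide (a < av)))
              ↔ ((j : Int) ∈ pvAfter (pvObst tab) (pvDown ip.toNat)) := by
            rw [List.mem_filter, PySem.List.mem_pyRange_one, hchar]
            simp only [decide_eq_true_eq]
            omega
          rw [if_congr hiff rfl rfl]
        · rw [List.getElem?_eq_none, List.getElem?_eq_none] <;> rw [pv_setFold_len] <;> omega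
      dsimp only
      rw [← hEq1]
      exact pv_stage2 _ ip hmem.1

-- ===== VERDICT =====
theorem tab_anti_saut_spec : Claim_equal_tab_anti_saut := by
  intro tab _ _
  unfold Spec_tab_anti_saut
  exact pv_main tab
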